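-- pv_equiv track=rewrite | github.com/naichazhenhaohe/seCourseDesign | codes/MakeIndex.py | sortlocation
-- ===== SOURCE A (Python) =====
-- def sortlocation(location_dic):
--     sorted_location = {}
--     for key,value in location_dic.items():
--         if(value>0):
--             sorted_location[key] = value
--     after = sorted(sorted_location.values(),reverse=True)
--     after_sort = []
--     for i in after:
--         for item in sorted_location.items():
--             if i == item[1]:
--                 after_sort.append(item[0])
--     return after_sort
-- ===== SOURCE B (Python) =====
-- def sortlocation(location_dic):
--     # One pass groups keys by value (insertion order kept); then emit each
--     # group once per occurrence of its value in the sorted value list.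
--     groups = {}
--     vals = []
--     for key, value in location_dic.items():
--         if value > 0:
--             groups.setdefault(value, []).append(key)
--             vals.append(value)
--     out = []
--     for v in sorted(vals, reverse=True):
--         out.extend(groups[v])
--     return out
-- ===== Notes on version B (the rewrite author's own statement) =====
-- stated objective: faster
-- what changed: B builds a value->keys index in one pass and emits the precomputed group for each sorted value, removing A's inner scan over all items per value occurrence.
import Mathlib
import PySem

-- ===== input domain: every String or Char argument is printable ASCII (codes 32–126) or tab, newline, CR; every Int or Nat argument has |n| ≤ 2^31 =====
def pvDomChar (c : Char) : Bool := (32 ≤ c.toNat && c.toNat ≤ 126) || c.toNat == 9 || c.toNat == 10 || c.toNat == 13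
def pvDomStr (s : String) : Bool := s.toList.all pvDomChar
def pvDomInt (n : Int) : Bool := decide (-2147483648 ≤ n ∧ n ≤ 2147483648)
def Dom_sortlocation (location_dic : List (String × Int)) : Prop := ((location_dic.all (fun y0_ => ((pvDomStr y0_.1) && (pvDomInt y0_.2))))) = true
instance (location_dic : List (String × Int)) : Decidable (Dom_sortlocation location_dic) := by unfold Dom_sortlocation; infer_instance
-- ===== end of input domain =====

-- B: one-pass value->keys grouping, then emit the group per sorted value (removes A's inner scan).
-- ===== PORT A =====
def sortlocation (location_dic : List (String × Int)) : List String :=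
  let d := PySem.Dict.ofList location_dic
  let sorted_location := d.items.foldl
    (fun sl p => if p.2 > 0 then sl.insert p.1 p.2 else sl) PySem.Dict.empty
  let after := PySem.List.sorted sorted_location.values (fun v => v) true
  after.foldl (fun acc i =>
    sorted_location.items.foldl
      (fun acc item => if i == item.2 then acc ++ [item.1] else acc) acc) []

-- ===== PORT B =====
def sortlocation_alt (location_dic : List (String × Int)) : List String :=
  let d := PySem.Dict.ofList location_dic
  let gv := d.items.foldl
    (fun (gv : PySem.Dict Int (List String) × List Int) p =>
      if p.2 > 0 then (gv.1.modify p.2 [] (· ++ [p.1]), gv.2 ++ [p.2]) else gv)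
    (PySem.Dict.empty, [])
  (PySem.List.sorted gv.2 (fun v => v) true).foldl
    (fun out v => out ++ gv.1.getD v []) []

-- ===== PRECONDITION & SPEC =====
def Spec_sortlocation (location_dic : List (String × Int)) (out : List String) : Prop := out = sortlocation_alt location_dic
instance (location_dic : List (String × Int)) (out : List String) : Decidable (Spec_sortlocation location_dic out) := by unfold Spec_sortlocation; infer_instance

-- ===== CLAIM (what is proved, stated in full; the proofs are below) =====
def Claim_equal_sortlocation : Prop := ∀ (location_dic : List (String × Int)), Dom_sortlocation location_dic → Spec_sortlocation location_dic (sortlocation location_dic)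

-- ===== LEMMAS AND PROOFS =====
-- pair fold split
theorem pairSplit : ∀ (F : List (String × Int)) (g : PySem.Dict Int (List String)) (vs : List Int),
    F.foldl (fun gv p => (gv.1.modify p.2 [] (· ++ [p.1]), gv.2 ++ [p.2])) (g, vs)
      = (F.foldl (fun g p => g.modify p.2 [] (· ++ [p.1])) g, vs ++ F.map (·.2)) := by
  intro F
  induction F with
  | nil => simp
  | cons h t ih => intro g vs; simp [List.foldl_cons, ih]

-- getD of the swapped-group fold
theorem groupGetD (F : List (String × Int)) (v : Int) :
    (F.foldl (fun g p => g.modify p.2 [] (· ++ [p.1])) PySem.Dict.empty).getD v []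
      = (F.filter (fun p => p.2 == v)).map (·.1) := by
  have h : F.foldl (fun g p => g.modify p.2 [] (· ++ [p.1])) PySem.Dict.empty
      = (F.map Prod.swap).foldl (fun g q => g.modify q.1 [] (· ++ [q.2])) PySem.Dict.empty := by
    simp [List.foldl_map]
  rw [h, PySem.Dict.getD_foldl_modify_append]
  simp [List.filter_map, Function.comp_def, List.map_map]

-- items of the A build over nodup fresh keys
theorem slItems (F : List (String × Int)) (hnd : (F.map Prod.fst).Nodup) :
    (F.foldl (fun sl p => sl.insert p.1 p.2) (PySem.Dict.empty : PySem.Dict String Int)).items = F := by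
  have := PySem.Dict.items_foldl_insert_fresh (l := F) (k := Prod.fst) (v := Prod.snd)
    (d := PySem.Dict.empty) (by simp) hnd
  simpa using this

theorem sortlocation_eq_alt (L : List (String × Int)) : sortlocation L = sortlocation_alt L := by
  show (let d := PySem.Dict.ofList L;
    let sorted_location := List.foldl (fun sl p => if p.2 > 0 then sl.insert p.1 p.2 else sl) PySem.Dict.empty d.items;
    let after := PySem.List.sorted sorted_location.values (fun v => v) true;
    List.foldl (fun acc i => List.foldl (fun acc item => if (i == item.2) = true then acc ++ [item.1] else acc) acc sorted_location.items) [] after) = _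
  simp only [sortlocation_alt]
  have hnd : (((PySem.Dict.ofList L).items.filter (fun p => decide (0 < p.2))).map Prod.fst).Nodup := by
    refine List.Nodup.sublist (List.Sublist.map Prod.fst List.filter_sublist) ?_
    have := PySem.Dict.nodup_keys_ofList (ps := L)
    simpa [PySem.Dict.keys] using this
  set Li := (PySem.Dict.ofList L).items with hLi
  set F := Li.filter (fun p => decide (0 < p.2)) with hFdef
  have hA1 : Li.foldl (fun sl p => if p.2 > 0 then sl.insert p.1 p.2 else sl)
      (PySem.Dict.empty : PySem.Dict String Int)
      = F.foldl (fun sl p => sl.insert p.1 p.2) PySem.Dict.empty := by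
    rw [hFdef, List.foldl_filter]
    simp
  have hB1 : Li.foldl (fun (gv : PySem.Dict Int (List String) × List Int) p =>
        if p.2 > 0 then (gv.1.modify p.2 [] (· ++ [p.1]), gv.2 ++ [p.2]) else gv)
        (PySem.Dict.empty, [])
      = F.foldl (fun gv p => (gv.1.modify p.2 [] (· ++ [p.1]), gv.2 ++ [p.2]))
        (PySem.Dict.empty, []) := by
    rw [hFdef, List.foldl_filter]
    simp
  rw [hA1, hB1, pairSplit]
  have hvals : (F.foldl (fun sl p => sl.insert p.1 p.2) (PySem.Dict.empty : PySem.Dict String Int)).values = F.map (·.2) := by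
    show (F.foldl (fun sl p => sl.insert p.1 p.2) (PySem.Dict.empty : PySem.Dict String Int)).items.map (·.2) = _
    rw [slItems F hnd]
  rw [slItems F hnd, hvals]
  simp only [List.nil_append]
  apply PySem.List.foldl_congr_mem
  intro acc i _
  rw [PySem.List.foldl_append_if (fun item => i == item.2) Prod.fst F acc, groupGetD F i]
  congr 1
  apply congrArg
  refine List.filter_congr ?_
  intro p _
  simp [eq_comm]


-- ===== VERDICT (by name: the statement is the Claim_ definition above) =====
theorem sortlocation_spec : Claim_equal_sortlocation := by
  intro L _
  exact sortlocation_eq_alt L
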